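-- pv_equiv track=rewrite | github.com/giff-h/aoc2018 | py/day14.py | part2
-- ===== SOURCE A (Python) =====
-- def part2(puzzle_input):
--     puzzle_input = str(puzzle_input)
--     all_scores = "37"
--     elves = [0, 1]
--     while puzzle_input not in all_scores[-1 * (len(puzzle_input) + 2):]:
--         elfs_recipes = [int(all_scores[elf]) for elf in elves]
--         all_scores += str(sum(elfs_recipes))
--         elves = [(elf + r + 1) % len(all_scores) for elf, r in zip(elves, elfs_recipes)]
--
--     return all_scores.index(puzzle_input)
-- ===== SOURCE B (Python) =====
-- def _extend(scores, e1, e2, n):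
--     # grow the digit scoreboard to at least n digits; matching is not looked at here
--     while len(scores) < n:
--         s = scores[e1] + scores[e2]
--         if s >= 10:
--             scores.append(1)
--             scores.append(s - 10)
--         else:
--             scores.append(s)
--         L = len(scores)
--         e1 = (e1 + 1 + scores[e1]) % L
--         e2 = (e2 + 1 + scores[e2]) % L
--     return e1, e2
--
--
-- def _find(scores, target):
--     # leftmost occurrence of target in the digit list, or -1
--     k = len(target)
--     for i in range(len(scores) - k + 1):
--         if scores[i:i + k] == target:
--             return i
--     return -1
--
--
-- def part2(puzzle_input):
--     target = [int(c) for c in str(puzzle_input)]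
--     scores = [3, 7]
--     e1, e2 = 0, 1
--     n = 32
--     while True:
--         e1, e2 = _extend(scores, e1, e2, n)
--         i = _find(scores, target)
--         if i >= 0:
--             return i
--         n *= 2
-- ===== Notes on version B (the rewrite author's own statement) =====
-- stated objective: alternative
-- what changed: B separates generation from matching: a pure simulator extends the digit list (never looking for the target) to exponentially doubled lengths, and after each stage a single whole-prefix scan returns the leftmost occurrence of the target; A instead rebuilds a string and checks a tail slice for containment on every simulation step and runs a final .index. Negative inputs are excluded by Pre_ because A never returns on them.
import Mathlib
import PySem

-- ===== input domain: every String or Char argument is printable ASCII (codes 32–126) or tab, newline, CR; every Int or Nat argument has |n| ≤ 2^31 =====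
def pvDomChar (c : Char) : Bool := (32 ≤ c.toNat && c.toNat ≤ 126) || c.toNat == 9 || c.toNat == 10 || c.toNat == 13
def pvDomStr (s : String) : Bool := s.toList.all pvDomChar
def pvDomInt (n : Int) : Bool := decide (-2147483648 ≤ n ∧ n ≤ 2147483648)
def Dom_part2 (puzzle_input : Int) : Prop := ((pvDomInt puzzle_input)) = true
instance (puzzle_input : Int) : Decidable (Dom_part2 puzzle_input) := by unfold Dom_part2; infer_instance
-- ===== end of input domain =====

-- B separates generation from matching: a pure simulator extends the digit list (never looking at
-- the target) to exponentially doubled lengths, and after each stage one whole-prefix scan returns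
-- the leftmost occurrence; A checks a tail slice for containment on every step of a growing string
-- and runs a final .index. The unbounded Python while-loops are totalized with a fuel parameter
-- that only makes them total; the theorems hold for the stated fuels.

-- ===== PORT A =====
-- literal transliteration of A: the scoreboard string as Array Char (append in place), `int(all_scores[elf])`
-- is getD + ofChars? (always in range, always a digit on A's runs), the negative slice
-- `all_scores[-(len+2):]` is the clamped suffix extract (exact: Python clamps the start at 0 the same
-- way), `in` is Chars.isIn and `.index` is Chars.find (A only stops when the substring is present).
def part2Loop (pi : List Char) : Nat → Array Char → List Int → Array Char × List Int
  | 0, s, elves => (s, elves)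
  | fuel+1, s, elves =>
    if PySem.Chars.isIn pi ((s.extract (s.size - (pi.length + 2)) s.size).toList) then
      (s, elves)
    else
      let rs := elves.map (fun e => (PySem.Int.ofChars? [s.getD e.toNat ' ']).getD 0)
      let s' := s ++ (PySem.Int.toChars rs.sum).toArray
      part2Loop pi fuel s'
        ((elves.zip rs).map (fun er => PySem.Int.mod (er.1 + er.2 + 1) (s'.size : Int)))

def part2 (puzzle_input : Int) : Int :=
  let pi := PySem.Int.toChars puzzle_input
  PySem.Chars.find (part2Loop pi 4294967296 #['3', '7'] [0, 1]).1.toList pi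

-- ===== PORT B =====
-- port of Source B: the scoreboard as Array Int (list.append is in-place); `_find` iterates the Python
-- range as pyRange with the slice `scores[i:i+k]` as the clamped extract (exact for 0 ≤ i);
-- `_extend`'s while-loop and the outer `while True` carry fuel parameters that only totalize them.
def altFindGo (scores : Array Int) (t : List Int) : List Int → Int
  | [] => -1
  | i :: rest =>
    if (scores.extract i.toNat (i.toNat + t.length)).toList = t then i
    else altFindGo scores t rest

def altFind (scores : Array Int) (t : List Int) : Int :=
  altFindGo scores t (PySem.List.pyRange 0 ((scores.size : Int) - (t.length : Int) + 1) 1)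

def altGen : Nat → Nat → Array Int → Int → Int → Nat × Array Int × Int × Int
  | 0, _, sc, e1, e2 => (0, sc, e1, e2)
  | f+1, n, sc, e1, e2 =>
    if sc.size < n then
      let s := sc.getD e1.toNat 0 + sc.getD e2.toNat 0
      let sc' := if 10 ≤ s then (sc.push 1).push (s - 10) else sc.push s
      let L : Int := (sc'.size : Int)
      altGen f n sc'
        (PySem.Int.mod (e1 + 1 + sc'.getD e1.toNat 0) L)
        (PySem.Int.mod (e2 + 1 + sc'.getD e2.toNat 0) L)
    else (f+1, sc, e1, e2)

def altOuter (t : List Int) : Nat → Nat → Nat → Array Int → Int → Int → Int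
  | 0, _, _, sc, _, _ => altFind sc t
  | o+1, f, n, sc, e1, e2 =>
    let r := altGen f n sc e1 e2
    let i := altFind r.2.1 t
    if 0 ≤ i then i
    else if r.1 = 0 then -1
    else altOuter t o r.1 (2 * n) r.2.1 r.2.2.1 r.2.2.2

def part2_alt (puzzle_input : Int) : Int :=
  let target := (PySem.Int.toChars puzzle_input).map (fun c => (PySem.Int.ofChars? [c]).getD 0)
  altOuter target 4294967297 4294967296 32 #[3, 7] 0 1

-- ===== PRECONDITION & SPEC =====
-- Pre_ excludes negative inputs: str(n) then contains '-', which never occurs among the digit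
-- characters of the scoreboard, so Python A's while-loop never terminates (A returns no value).
def Pre_part2 (puzzle_input : Int) : Prop := 0 ≤ puzzle_input
instance (puzzle_input : Int) : Decidable (Pre_part2 puzzle_input) := by unfold Pre_part2; infer_instance
def pvWitness_part2 : Int := 51589

def Spec_part2 (puzzle_input : Int) (out : Int) : Prop := out = part2_alt puzzle_input
instance (puzzle_input : Int) (out : Int) : Decidable (Spec_part2 puzzle_input out) := by unfold Spec_part2; infer_instance

-- ===== CLAIM (what is proved, stated in full; the proofs are below) =====
def Claim_equal_part2 : Prop := ∀ (puzzle_input : Int), Dom_part2 puzzle_input → Pre_part2 puzzle_input → Spec_part2 puzzle_input (part2 puzzle_input)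

-- ===== LEMMAS AND PROOFS =====

-- the digit character of a digit value
def dchr (v : Int) : Char := Nat.digitChar v.toNat

-- lists of single decimal digits
def GoodD (l : List Int) : Prop := ∀ v ∈ l, 0 ≤ v ∧ v < 10

-- "t occurs in s starting at position j" (used at Char for A's side, at Int for B's side)
def Occ {α : Type} (t s : List α) (j : Nat) : Prop := (s.drop j).take t.length = t

-- "t occurs nowhere in s"
def NoOcc {α : Type} (t s : List α) : Prop := ∀ j, ¬ Occ t s j

-- the loop invariant both simulations maintain
def SimInv (d : List Int) (e1 e2 : Int) : Prop :=
  GoodD d ∧ 2 ≤ d.length ∧ 0 ≤ e1 ∧ e1 < (d.length : Int) ∧ 0 ≤ e2 ∧ e2 < (d.length : Int)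

-- one simulation step, shared by the lockstep lemmas for both ports
def stepState (d : List Int) (e1 e2 : Int) : List Int × Int × Int :=
  let a := d.getD e1.toNat 0
  let b := d.getD e2.toNat 0
  let d1 := d ++ (if (10 : Int) ≤ a + b then [1, a + b - 10] else [a + b])
  (d1, PySem.Int.mod (e1 + a + 1) (d1.length : Int), PySem.Int.mod (e2 + b + 1) (d1.length : Int))

lemma dchr_cast (v : Nat) : dchr (v : Int) = Nat.digitChar v := by
  simp [dchr]

lemma digitChar_inj : ∀ v : Nat, v < 10 → ∀ w : Nat, w < 10 → Nat.digitChar v = Nat.digitChar w → v = w := by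
  decide

lemma good_inj : ∀ {a b : List Int}, GoodD a → GoodD b → a.map dchr = b.map dchr → a = b := by
  intro a
  induction a with
  | nil => intro b _ _ h; cases b <;> simp_all
  | cons x xs ih =>
    intro b ha hb h
    cases b with
    | nil => simp_all
    | cons y ys =>
      simp only [List.map_cons, List.cons.injEq] at h
      have hx := ha x (by simp)
      have hy := hb y (by simp)
      have hxy : x = y := by
        have := digitChar_inj x.toNat (by omega) y.toNat (by omega) (by simpa [dchr] using h.1)
        omega
      have := ih (fun v hv => ha v (by simp [hv])) (fun v hv => hb v (by simp [hv])) h.2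
      simp [hxy, this]

lemma ofChars_digitChar : ∀ v : Nat, v < 10 → PySem.Int.ofChars? [Nat.digitChar v] = some (v : Int) := by
  decide

lemma ofChars_dchr (v : Int) (h0 : 0 ≤ v) (h : v < 10) :
    PySem.Int.ofChars? [dchr v] = some v := by
  have := ofChars_digitChar v.toNat (by omega)
  rw [dchr]; rw [this]
  congr 1; omega

lemma toChars_small (m : Int) (h0 : 0 ≤ m) (h : m < 19) :
    PySem.Int.toChars m = (if 10 ≤ m then [1, m - 10] else [m]).map dchr := by
  interval_cases m <;> decide

lemma toDigitsCore_digits : ∀ (f n : Nat) (acc : List Char),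
    (∃ vs : List Nat, (∀ v ∈ vs, v < 10) ∧ acc = vs.map Nat.digitChar) →
    ∃ vs : List Nat, (∀ v ∈ vs, v < 10) ∧ Nat.toDigitsCore 10 f n acc = vs.map Nat.digitChar := by
  intro f
  induction f with
  | zero => intro n acc h; simpa [Nat.toDigitsCore] using h
  | succ f ih =>
    intro n acc h
    obtain ⟨vs, hvs, rfl⟩ := h
    have hacc' : ∃ vs' : List Nat, (∀ v ∈ vs', v < 10) ∧
        Nat.digitChar (n % 10) :: vs.map Nat.digitChar = vs'.map Nat.digitChar := by
      refine ⟨n % 10 :: vs, ?_, by simp⟩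
      intro v hv
      rcases List.mem_cons.mp hv with h1 | h2
      · omega
      · exact hvs v h2
    simp only [Nat.toDigitsCore]
    split
    · exact hacc'
    · exact ih _ _ hacc'

lemma toDigitsCore_ne_nil : ∀ (f n : Nat) (acc : List Char), (0 < f ∨ acc ≠ []) →
    Nat.toDigitsCore 10 f n acc ≠ [] := by
  intro f
  induction f with
  | zero => intro n acc h; simp only [Nat.toDigitsCore]; tauto
  | succ f ih =>
    intro n acc _
    simp only [Nat.toDigitsCore]
    split
    · simp
    · exact ih _ _ (Or.inr (by simp))

lemma target_spec (n : Int) (h : 0 ≤ n) :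
    ∃ t : List Int, GoodD t ∧ t ≠ [] ∧ PySem.Int.toChars n = t.map dchr ∧
      (PySem.Int.toChars n).map (fun c => (PySem.Int.ofChars? [c]).getD 0) = t := by
  have hne : PySem.Int.toChars n = Nat.toDigits 10 n.toNat := by
    simp [PySem.Int.toChars, not_lt.mpr h]
  obtain ⟨vs, hvs, hchars⟩ := toDigitsCore_digits (n.toNat + 1) n.toNat [] ⟨[], by simp⟩
  have htd : Nat.toDigits 10 n.toNat = vs.map Nat.digitChar := hchars
  have hnil : vs ≠ [] := by
    have h2 := toDigitsCore_ne_nil (n.toNat + 1) n.toNat [] (Or.inl (by omega))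
    intro hcon
    rw [hcon] at hchars
    simp only [List.map_nil] at hchars
    exact h2 hchars
  refine ⟨vs.map (fun w : Nat => (w : Int)), ?_, by simpa using hnil, ?_, ?_⟩
  · intro v hv
    obtain ⟨w, hw, rfl⟩ := List.mem_map.mp hv
    have := hvs w hw
    constructor <;> omega
  · rw [hne, htd, List.map_map]
    apply List.map_congr_left
    intro v _
    exact (dchr_cast v).symm
  · rw [hne, htd, List.map_map]
    apply List.map_congr_left
    intro v hv
    simp only [Function.comp_apply]
    rw [ofChars_digitChar v (hvs v hv)]
    rfl

lemma drop_append_take {α : Type} (s u : List α) (j k : Nat) (h : j + k ≤ s.length) :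
    ((s ++ u).drop j).take k = (s.drop j).take k := by
  rw [List.drop_append_of_le_length (by omega),
      List.take_append_of_le_length (by simp; omega)]

lemma occ_len {α : Type} {t s : List α} {j : Nat} (ht : t ≠ []) (h : Occ t s j) :
    j + t.length ≤ s.length := by
  have hl := congrArg List.length h
  simp only [List.length_take, List.length_drop] at hl
  have : 0 < t.length := List.length_pos_of_ne_nil ht
  omega

lemma occ_ext {α : Type} {t s : List α} (u : List α) {j : Nat}
    (h : Occ t s j) (hj : j + t.length ≤ s.length) : Occ t (s ++ u) j := by
  unfold Occ at *
  rw [drop_append_take s u j t.length hj]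
  exact h

lemma occ_restrict {α : Type} {t s u : List α} {j : Nat}
    (h : Occ t (s ++ u) j) (hj : j + t.length ≤ s.length) : Occ t s j := by
  unfold Occ at *
  rwa [drop_append_take s u j t.length hj] at h

-- minimality of an occurrence that fits in s survives appending to s
lemma occ_min_append {α : Type} {t s : List α} (u : List α) {j : Nat} (ht : t ≠ [])
    (hocc : Occ t s j) (hmin : ∀ i, i < j → ¬ Occ t s i) :
    ∀ i, i < j → ¬ Occ t (s ++ u) i := by
  intro i hi hoc
  have hj := occ_len ht hocc
  by_cases hle : i + t.length ≤ s.length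
  · exact hmin i hi (occ_restrict hoc hle)
  · omega

lemma isIn_drop_true {t s : List Char} {j m : Nat} (h : Occ t s j) (hm : m ≤ j) :
    PySem.Chars.isIn t (s.drop m) = true := by
  rw [← PySem.Chars.exists_prefix_drop_iff_isIn]
  refine ⟨j - m, ?_⟩
  rw [List.drop_drop]
  have he : m + (j - m) = j := by omega
  rw [he]
  exact List.prefix_iff_eq_take.mpr h.symm

lemma isIn_drop_false {t s : List Char} (hno : NoOcc t s) (m : Nat) :
    PySem.Chars.isIn t (s.drop m) = false := by
  by_contra hc
  have hin : PySem.Chars.isIn t (s.drop m) = true := by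
    cases h : PySem.Chars.isIn t (s.drop m) <;> simp_all
  obtain ⟨j, hj⟩ := (PySem.Chars.exists_prefix_drop_iff_isIn _ _).mpr hin
  rw [List.drop_drop] at hj
  exact hno (m + j) ((List.prefix_iff_eq_take.mp hj).symm)

lemma find_none {t s : List Char} (hno : NoOcc t s) :
    PySem.Chars.find s t = -1 := by
  rw [PySem.Chars.find_eq_neg_one_iff]
  intro hinf
  have hin : PySem.Chars.isIn t s = true := (PySem.Chars.isIn_iff_infix _ _).mpr hinf
  obtain ⟨j, hj⟩ := (PySem.Chars.exists_prefix_drop_iff_isIn _ _).mpr hin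
  exact hno j ((List.prefix_iff_eq_take.mp hj).symm)

lemma find_eq_occ {t s : List Char} {j : Nat} (h : Occ t s j)
    (hmin : ∀ i, i < j → ¬ Occ t s i) : PySem.Chars.find s t = (j : Int) := by
  have hpre : t <+: s.drop j := List.prefix_iff_eq_take.mpr h.symm
  have hin : PySem.Chars.isIn t s = true :=
    (PySem.Chars.exists_prefix_drop_iff_isIn _ _).mp ⟨j, hpre⟩
  have hnn : 0 ≤ PySem.Chars.find s t :=
    (PySem.Chars.find_nonneg_iff _ _).mpr ((PySem.Chars.isIn_iff_infix _ _).mp hin)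
  obtain ⟨hocc, hlt⟩ := PySem.Chars.find_spec hnn
  have heq : (PySem.Chars.find s t).toNat = j := by
    rcases Nat.lt_trichotomy (PySem.Chars.find s t).toNat j with hl | he | hg
    · exact absurd ((List.prefix_iff_eq_take.mp hocc).symm) (hmin _ hl)
    · exact he
    · exact absurd hpre (hlt j hg)
  omega

-- bridges between the Array scoreboards of the ports and their underlying lists
lemma arr_suffix {α : Type} (xs : List α) (k : Nat) :
    ((xs.toArray).extract (xs.toArray.size - k) xs.toArray.size).toList
      = xs.drop (xs.length - k) := by
  rw [Array.toList_extract]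
  simp only [List.toList_toArray, List.size_toArray]
  rw [List.extract_eq_take_drop]
  apply List.take_of_length_le
  simp only [List.length_drop]
  omega

lemma arr_window {α : Type} (xs : List α) (i k : Nat) :
    ((xs.toArray).extract i (i + k)).toList = (xs.drop i).take k := by
  rw [Array.toList_extract]
  simp only [List.toList_toArray]
  rw [List.extract_eq_take_drop]
  congr 1
  omega

lemma arr_getD {α : Type} (xs : List α) (i : Nat) (d : α) (h : i < xs.length) :
    (xs.toArray).getD i d = xs[i] := by
  rw [Array.getD_eq_getD_getElem?]
  have h2 : xs.toArray[i]? = some xs[i] := by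
    rw [Array.getElem?_eq_getElem (by simpa using h)]
    rw [List.getElem_toArray]
  rw [h2]
  rfl

lemma arr_getD_pre (d tail : List Int) (e : Int) (h0 : 0 ≤ e) (h1 : e < (d.length : Int)) :
    ((d ++ tail).toArray).getD e.toNat 0 = d[e.toNat]'(by omega) := by
  rw [arr_getD _ _ _ (by simp only [List.length_append]; omega)]
  exact List.getElem_append_left (by omega)

-- the occurrence predicate transports along the digit-to-character map
lemma occ_map_iff {t d : List Int} (hGt : GoodD t) (hGd : GoodD d) (j : Nat) :
    Occ t d j ↔ Occ (t.map dchr) (d.map dchr) j := by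
  unfold Occ
  simp only [List.length_map]
  constructor
  · intro h
    rw [← List.map_drop, ← List.map_take, h]
  · intro h
    rw [← List.map_drop, ← List.map_take] at h
    exact good_inj (fun v hv => hGd v (List.mem_of_mem_drop (List.mem_of_mem_take hv))) hGt h

lemma noOcc_map_iff {t d : List Int} (hGt : GoodD t) (hGd : GoodD d) :
    NoOcc t d ↔ NoOcc (t.map dchr) (d.map dchr) := by
  unfold NoOcc
  exact forall_congr' (fun j => not_congr (occ_map_iff hGt hGd j))

lemma exists_min_occ {t d : List Int} (h : ∃ j, Occ t d j) :
    ∃ j, Occ t d j ∧ ∀ i, i < j → ¬ Occ t d i := by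
  obtain ⟨j, hj, hmin⟩ := (wellFounded_lt (α := Nat)).has_min {i | Occ t d i} h
  exact ⟨j, hj, fun i hi hoc => hmin i hoc hi⟩

lemma loop_stop (pi : List Char) (f : Nat) (s : Array Char) (elves : List Int)
    (h : PySem.Chars.isIn pi ((s.extract (s.size - (pi.length + 2)) s.size).toList) = true) :
    part2Loop pi f s elves = (s, elves) := by
  cases f with
  | zero => rfl
  | succ f =>
    simp only [part2Loop]
    rw [if_pos h]

-- when an occurrence reaches into the window A checks, A's loop stops at once and
-- .index returns the first occurrence
lemma a_exit (t : List Int) (d' : List Int) (j : Nat) (f : Nat) (elves : List Int)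
    (hocc : Occ (t.map dchr) (d'.map dchr) j)
    (hmin : ∀ i, i < j → ¬ Occ (t.map dchr) (d'.map dchr) i)
    (hwin : d'.length ≤ j + t.length + 2) :
    PySem.Chars.find (part2Loop (t.map dchr) f ((d'.map dchr).toArray) elves).1.toList
      (t.map dchr) = (j : Int) := by
  have hchk : PySem.Chars.isIn (t.map dchr)
      ((((d'.map dchr).toArray).extract
        ((d'.map dchr).toArray.size - ((t.map dchr).length + 2))
        ((d'.map dchr).toArray.size)).toList) = true := by
    rw [arr_suffix]
    refine isIn_drop_true hocc ?_
    simp only [List.length_map]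
    omega
  rw [loop_stop _ _ _ _ hchk]
  simp only [List.toList_toArray]
  exact find_eq_occ hocc hmin

-- the shared step preserves the invariant and only appends digits
lemma inv_step {d : List Int} {e1 e2 : Int} (h : SimInv d e1 e2) :
    SimInv (stepState d e1 e2).1 (stepState d e1 e2).2.1 (stepState d e1 e2).2.2 ∧
    d.length + 1 ≤ (stepState d e1 e2).1.length ∧
    (stepState d e1 e2).1.length ≤ d.length + 2 ∧
    (∃ u, (stepState d e1 e2).1 = d ++ u) := by
  obtain ⟨hGd, hlen, h10, h11, h20, h21⟩ := h
  have hn1 : e1.toNat < d.length := by omega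
  have hn2 : e2.toNat < d.length := by omega
  have hb1 := hGd _ (List.getElem_mem hn1)
  have hb2 := hGd _ (List.getElem_mem hn2)
  have hg1 : d.getD e1.toNat 0 = d[e1.toNat] := List.getD_eq_getElem d 0 hn1
  have hg2 : d.getD e2.toNat 0 = d[e2.toNat] := List.getD_eq_getElem d 0 hn2
  simp only [stepState, hg1, hg2]
  set a := d[e1.toNat] with ha
  set b := d[e2.toNat] with hb
  set u := (if (10 : Int) ≤ a + b then [1, a + b - 10] else [a + b]) with hu
  have hul : 1 ≤ u.length ∧ u.length ≤ 2 := by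
    rw [hu]; split_ifs <;> simp
  have hgu : GoodD u := by
    intro v hv
    rw [hu] at hv
    split_ifs at hv <;> simp at hv
    · rcases hv with rfl | rfl <;> omega
    · subst hv; omega
  have hpos : (0 : Int) < ((d ++ u).length : Int) := by
    simp only [List.length_append]; omega
  refine ⟨⟨?_, ?_, ?_, ?_, ?_, ?_⟩, ?_, ?_, ⟨u, rfl⟩⟩
  · intro v hv
    rcases List.mem_append.mp hv with h | h
    · exact hGd v h
    · exact hgu v h
  · simp only [List.length_append]; omega
  · exact PySem.Int.mod_nonneg _ hpos
  · exact PySem.Int.mod_lt _ hpos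
  · exact PySem.Int.mod_nonneg _ hpos
  · exact PySem.Int.mod_lt _ hpos
  · simp only [List.length_append]; omega
  · simp only [List.length_append]; omega

-- one iteration of A's loop on a no-occurrence state is exactly the shared step
lemma astep (t d : List Int) (e1 e2 : Int) (f : Nat) (h : SimInv d e1 e2)
    (hno : NoOcc (t.map dchr) (d.map dchr)) :
    part2Loop (t.map dchr) (f+1) ((d.map dchr).toArray) [e1, e2]
      = part2Loop (t.map dchr) f (((stepState d e1 e2).1.map dchr).toArray)
          [(stepState d e1 e2).2.1, (stepState d e1 e2).2.2] := by
  obtain ⟨hGd, hlen, h10, h11, h20, h21⟩ := h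
  have hn1 : e1.toNat < d.length := by omega
  have hn2 : e2.toNat < d.length := by omega
  have hb1 := hGd _ (List.getElem_mem hn1)
  have hb2 := hGd _ (List.getElem_mem hn2)
  have hchk : PySem.Chars.isIn (t.map dchr)
      ((((d.map dchr).toArray).extract
        ((d.map dchr).toArray.size - ((t.map dchr).length + 2))
        ((d.map dchr).toArray.size)).toList) = false := by
    rw [arr_suffix]
    exact isIn_drop_false hno _
  have hg1 : (PySem.Int.ofChars? [((d.map dchr).toArray).getD e1.toNat ' ']).getD 0
      = d[e1.toNat] := by
    rw [arr_getD _ _ _ (by simp only [List.length_map]; omega)]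
    simp only [List.getElem_map]
    rw [ofChars_dchr _ hb1.1 hb1.2]
    rfl
  have hg2 : (PySem.Int.ofChars? [((d.map dchr).toArray).getD e2.toNat ' ']).getD 0
      = d[e2.toNat] := by
    rw [arr_getD _ _ _ (by simp only [List.length_map]; omega)]
    simp only [List.getElem_map]
    rw [ofChars_dchr _ hb2.1 hb2.2]
    rfl
  have hgl1 : d.getD e1.toNat 0 = d[e1.toNat] := List.getD_eq_getElem d 0 hn1
  have hgl2 : d.getD e2.toNat 0 = d[e2.toNat] := List.getD_eq_getElem d 0 hn2
  simp only [part2Loop]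
  rw [if_neg (by rw [hchk]; simp)]
  simp only [List.map_cons, List.map_nil, hg1, hg2, List.sum_cons, List.sum_nil,
    add_zero, List.zip_cons_cons, List.zip_nil_right]
  rw [toChars_small (d[e1.toNat] + d[e2.toNat]) (by omega) (by omega)]
  simp only [stepState, hgl1, hgl2]
  set u := (if (10 : Int) ≤ d[e1.toNat] + d[e2.toNat]
      then [1, d[e1.toNat] + d[e2.toNat] - 10] else [d[e1.toNat] + d[e2.toNat]]) with hu
  have hmap : (d.map dchr).toArray ++ (u.map dchr).toArray = ((d ++ u).map dchr).toArray := by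
    simp [List.map_append]
  rw [hmap]
  have hsz : ((((d ++ u).map dchr).toArray.size : Nat) : Int) = ((d ++ u).length : Int) := by
    simp
  rw [hsz]

-- one iteration of B's generator below the length bound is exactly the shared step
lemma gstep (f n : Nat) (d : List Int) (e1 e2 : Int) (h : SimInv d e1 e2) (hlt : d.length < n) :
    altGen (f+1) n d.toArray e1 e2
      = altGen f n ((stepState d e1 e2).1.toArray)
          (stepState d e1 e2).2.1 (stepState d e1 e2).2.2 := by
  obtain ⟨hGd, hlen, h10, h11, h20, h21⟩ := h
  have hn1 : e1.toNat < d.length := by omega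
  have hn2 : e2.toNat < d.length := by omega
  have hp1 : (d.toArray).getD e1.toNat 0 = d[e1.toNat] := arr_getD _ _ _ hn1
  have hp2 : (d.toArray).getD e2.toNat 0 = d[e2.toNat] := arr_getD _ _ _ hn2
  have hgl1 : d.getD e1.toNat 0 = d[e1.toNat] := List.getD_eq_getElem d 0 hn1
  have hgl2 : d.getD e2.toNat 0 = d[e2.toNat] := List.getD_eq_getElem d 0 hn2
  simp only [altGen]
  rw [if_pos (by simpa using hlt)]
  simp only [hp1, hp2]
  set u := (if (10 : Int) ≤ d[e1.toNat] + d[e2.toNat]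
      then [1, d[e1.toNat] + d[e2.toNat] - 10] else [d[e1.toNat] + d[e2.toNat]]) with hu
  have harr : (if (10 : Int) ≤ d[e1.toNat] + d[e2.toNat]
      then (d.toArray.push 1).push (d[e1.toNat] + d[e2.toNat] - 10)
      else d.toArray.push (d[e1.toNat] + d[e2.toNat])) = (d ++ u).toArray := by
    rw [hu]; split_ifs <;> simp
  rw [harr]
  have hq1 : ((d ++ u).toArray).getD e1.toNat 0 = d[e1.toNat] := arr_getD_pre d u e1 h10 h11
  have hq2 : ((d ++ u).toArray).getD e2.toNat 0 = d[e2.toNat] := arr_getD_pre d u e2 h20 h21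
  rw [hq1, hq2]
  simp only [stepState, hgl1, hgl2, ← hu]
  have hsz : (((d ++ u).toArray.size : Nat) : Int) = ((d ++ u).length : Int) := by simp
  rw [hsz]
  congr 2 <;> ring_nf

-- B's generator: result shape, invariants, length and fuel accounting
lemma gen_spec : ∀ (f n : Nat) (d : List Int) (e1 e2 : Int), SimInv d e1 e2 →
    ∃ (f' : Nat) (d' : List Int) (e1' e2' : Int),
      altGen f n d.toArray e1 e2 = (f', d'.toArray, e1', e2') ∧
      SimInv d' e1' e2' ∧ (∃ u, d' = d ++ u) ∧
      d'.length ≤ max d.length (n+1) ∧ (f' = 0 ∨ n ≤ d'.length) ∧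
      f' ≤ f ∧ (d.length < n → 1 ≤ f → f' < f) := by
  intro f
  induction f with
  | zero =>
    intro n d e1 e2 h
    exact ⟨0, d, e1, e2, rfl, h, ⟨[], by simp⟩, le_max_left _ _, Or.inl rfl, le_refl _,
      fun _ h1 => absurd h1 (by omega)⟩
  | succ f ih =>
    intro n d e1 e2 h
    by_cases hlt : d.length < n
    · rw [gstep f n d e1 e2 h hlt]
      obtain ⟨hinv, hlo, hhi, u0, hu0⟩ := inv_step h
      obtain ⟨f', d', e1', e2', heq, hinv', ⟨u, hu⟩, hlen', hstop, hle, _⟩ :=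
        ih n (stepState d e1 e2).1 (stepState d e1 e2).2.1 (stepState d e1 e2).2.2 hinv
      refine ⟨f', d', e1', e2', heq, hinv', ⟨u0 ++ u, by rw [hu, hu0, List.append_assoc]⟩,
        ?_, hstop, by omega, fun _ _ => by omega⟩
      have : (stepState d e1 e2).1.length ≤ n + 1 := by omega
      calc d'.length ≤ max (stepState d e1 e2).1.length (n+1) := hlen'
        _ ≤ n + 1 := by omega
        _ ≤ max d.length (n+1) := le_max_right _ _
    · refine ⟨f+1, d, e1, e2, ?_, h, ⟨[], by simp⟩, le_max_left _ _,
        Or.inr (by omega), le_refl _, fun hc _ => absurd hc hlt⟩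
      simp only [altGen]
      rw [if_neg (by simpa using hlt)]

-- one stage: B's generator run against A's loop, split at the first occurrence
lemma stage (t : List Int) (hGt : GoodD t) (ht : t ≠ []) :
    ∀ (f n : Nat) (d : List Int) (e1 e2 : Int), SimInv d e1 e2 → NoOcc t d →
    ∃ (f' : Nat) (d' : List Int) (e1' e2' : Int),
      altGen f n d.toArray e1 e2 = (f', d'.toArray, e1', e2') ∧
      SimInv d' e1' e2' ∧
      d'.length ≤ max d.length (n+1) ∧ (f' = 0 ∨ n ≤ d'.length) ∧
      f' ≤ f ∧ (d.length < n → 1 ≤ f → f' < f) ∧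
      ( (NoOcc t d' ∧ part2Loop (t.map dchr) f ((d.map dchr).toArray) [e1, e2]
            = part2Loop (t.map dchr) f' ((d'.map dchr).toArray) [e1', e2'])
        ∨ (∃ j : Nat, Occ t d' j ∧ (∀ i, i < j → ¬ Occ t d' i) ∧
            PySem.Chars.find
              (part2Loop (t.map dchr) f ((d.map dchr).toArray) [e1, e2]).1.toList
              (t.map dchr) = (j : Int)) ) := by
  intro f
  induction f with
  | zero =>
    intro n d e1 e2 h hno
    exact ⟨0, d, e1, e2, rfl, h, le_max_left _ _, Or.inl rfl, le_refl _,
      fun _ h1 => absurd h1 (by omega), Or.inl ⟨hno, rfl⟩⟩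
  | succ f ih =>
    intro n d e1 e2 h hno
    by_cases hlt : d.length < n
    · obtain ⟨hinv, hlo, hhi, u0, hu0⟩ := inv_step h
      have hnoc : NoOcc (t.map dchr) (d.map dchr) := (noOcc_map_iff hGt h.1).mp hno
      have hstep := astep t d e1 e2 f h hnoc
      rw [gstep f n d e1 e2 h hlt]
      by_cases hno1 : NoOcc t (stepState d e1 e2).1
      · obtain ⟨f', d', e1', e2', heq, hinv', hlen', hstop, hle, _, hbr⟩ :=
          ih n (stepState d e1 e2).1 (stepState d e1 e2).2.1 (stepState d e1 e2).2.2 hinv hno1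
        refine ⟨f', d', e1', e2', heq, hinv', ?_, hstop, by omega, fun _ _ => by omega, ?_⟩
        · have : (stepState d e1 e2).1.length ≤ n + 1 := by omega
          calc d'.length ≤ max (stepState d e1 e2).1.length (n+1) := hlen'
            _ ≤ n + 1 := by omega
            _ ≤ max d.length (n+1) := le_max_right _ _
        · rcases hbr with ⟨hno', hloop⟩ | ⟨j, hj1, hj2, hj3⟩
          · exact Or.inl ⟨hno', by rw [hstep]; exact hloop⟩
          · exact Or.inr ⟨j, hj1, hj2, by rw [hstep]; exact hj3⟩
      · -- the first occurrence has just been completed by this step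
        have hex : ∃ j, Occ t (stepState d e1 e2).1 j := by
          unfold NoOcc at hno1
          push_neg at hno1
          exact hno1
        obtain ⟨j, hj, hjmin⟩ := exists_min_occ hex
        have hfit : j + t.length ≤ (stepState d e1 e2).1.length := occ_len ht hj
        have hnear : d.length < j + t.length := by
          by_contra hc
          push_neg at hc
          exact hno j (occ_restrict (by rwa [hu0] at hj) hc)
        obtain ⟨f', d', e1', e2', heq, hinv', ⟨u, hu⟩, hlen', hstop, hle, _⟩ :=
          gen_spec f n (stepState d e1 e2).1 (stepState d e1 e2).2.1 (stepState d e1 e2).2.2 hinv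
        refine ⟨f', d', e1', e2', heq, hinv', ?_, hstop, by omega, fun _ _ => by omega, ?_⟩
        · have : (stepState d e1 e2).1.length ≤ n + 1 := by omega
          calc d'.length ≤ max (stepState d e1 e2).1.length (n+1) := hlen'
            _ ≤ n + 1 := by omega
            _ ≤ max d.length (n+1) := le_max_right _ _
        · refine Or.inr ⟨j, ?_, ?_, ?_⟩
          · rw [hu]; exact occ_ext u hj hfit
          · rw [hu]; exact occ_min_append u ht hj hjmin
          · rw [hstep]
            exact a_exit t (stepState d e1 e2).1 j f _
              ((occ_map_iff hGt hinv.1 j).mp hj)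
              (fun i hi hoc => hjmin i hi ((occ_map_iff hGt hinv.1 i).mpr hoc))
              (by omega)
    · refine ⟨f+1, d, e1, e2, ?_, h, le_max_left _ _, Or.inr (by omega), le_refl _,
        fun hc _ => absurd hc hlt, Or.inl ⟨hno, rfl⟩⟩
      simp only [altGen]
      rw [if_neg (by simpa using hlt)]

-- B's linear scan finds nothing when there is no occurrence
lemma findGo_none (t d : List Int) (ht : t ≠ []) :
    ∀ (a b : Int), 0 ≤ a → (∀ i : Nat, a ≤ (i : Int) → ¬ Occ t d i) →
    altFindGo d.toArray t (PySem.List.pyRange a b 1) = -1 := by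
  intro a b
  by_cases hab : b ≤ a
  · intro _ _
    rw [PySem.List.pyRange_one_eq_nil hab]
    rfl
  · push_neg at hab
    have hm : (b - a).toNat = ((b - (a+1)).toNat) + 1 := by omega
    intro ha hno
    rw [PySem.List.pyRange_one_cons hab]
    simp only [altFindGo]
    rw [if_neg ?_]
    · exact findGo_none t d ht (a+1) b (by omega)
        (fun i hi => hno i (by omega))
    · rw [arr_window]
      exact fun hc => hno a.toNat (by omega) hc
termination_by a b => (b - a).toNat
decreasing_by omega

lemma findGo_occ (t d : List Int) (ht : t ≠ []) :
    ∀ (a b : Int), 0 ≤ a → ∀ j : Nat, Occ t d j → (∀ i, i < j → ¬ Occ t d i) →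
    a ≤ (j : Int) → (j : Int) < b →
    altFindGo d.toArray t (PySem.List.pyRange a b 1) = (j : Int) := by
  intro a b ha j hj hjmin haj hjb
  have hab : a < b := by omega
  rw [PySem.List.pyRange_one_cons hab]
  simp only [altFindGo]
  by_cases hcase : a = (j : Int)
  · rw [if_pos ?_]
    · exact hcase
    · rw [arr_window]
      have : a.toNat = j := by omega
      rw [this]
      exact hj
  · rw [if_neg ?_]
    · exact findGo_occ t d ht (a+1) b (by omega) j hj hjmin (by omega) hjb
    · rw [arr_window]
      exact fun hc => hjmin a.toNat (by omega) hc
termination_by a b => (b - a).toNat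
decreasing_by omega

lemma find_none_alt {t d : List Int} (ht : t ≠ []) (hno : NoOcc t d) :
    altFind d.toArray t = -1 := by
  unfold altFind
  exact findGo_none t d ht 0 _ (by omega) (fun i _ => hno i)

lemma find_occ_alt {t d : List Int} (ht : t ≠ []) {j : Nat} (hj : Occ t d j)
    (hjmin : ∀ i, i < j → ¬ Occ t d i) : altFind d.toArray t = (j : Int) := by
  unfold altFind
  have hfit : j + t.length ≤ d.length := occ_len ht hj
  have hk : 0 < t.length := List.length_pos_of_ne_nil ht
  refine findGo_occ t d ht 0 _ (by omega) j hj hjmin (by omega) ?_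
  simp only [List.size_toArray]
  push_cast
  omega

lemma altOuter_succ (t : List Int) (o f n : Nat) (sc : Array Int) (e1 e2 : Int) :
    altOuter t (o+1) f n sc e1 e2 =
      (let r := altGen f n sc e1 e2
       let i := altFind r.2.1 t
       if 0 ≤ i then i
       else if r.1 = 0 then -1
       else altOuter t o r.1 (2 * n) r.2.1 r.2.2.1 r.2.2.2) := rfl

-- the main correspondence: A's fuelled loop + .index against B's staged generate-and-search
lemma outer_eq (t : List Int) (hGt : GoodD t) (ht : t ≠ []) :
    ∀ (o : Nat), ∀ (f n : Nat) (d : List Int) (e1 e2 : Int),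
    SimInv d e1 e2 → NoOcc t d → d.length < n → 2 ≤ n → f < o →
    PySem.Chars.find (part2Loop (t.map dchr) f ((d.map dchr).toArray) [e1, e2]).1.toList
        (t.map dchr)
      = altOuter t o f n d.toArray e1 e2 := by
  intro o
  induction o with
  | zero => intro f n d e1 e2 _ _ _ _ hf; omega
  | succ o ih =>
    intro f n d e1 e2 hinv hno hdn hn2 hfo
    obtain ⟨f', d', e1', e2', heq, hinv', hlen', hstop, hle, hstrict, hbr⟩ :=
      stage t hGt ht f n d e1 e2 hinv hno
    simp only [altOuter, heq]
    rcases hbr with ⟨hno', hloop⟩ | ⟨j, hj1, hj2, hj3⟩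
    · have hfind : altFind d'.toArray t = -1 := find_none_alt ht hno'
      rw [hfind]
      rw [if_neg (by omega)]
      by_cases hf0 : f' = 0
      · rw [if_pos hf0]
        rw [hloop, hf0]
        simp only [part2Loop, List.toList_toArray]
        exact find_none ((noOcc_map_iff hGt hinv'.1).mp hno')
      · rw [if_neg hf0]
        rw [hloop]
        have hdn' : d'.length < 2 * n := by omega
        have hf'f : f' < f := hstrict hdn (by omega)
        exact ih f' (2 * n) d' e1' e2' hinv' hno' hdn' (by omega) (by omega)
    · have hfind : altFind d'.toArray t = (j : Int) := find_occ_alt ht hj1 hj2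
      rw [hfind]
      rw [if_pos (by omega)]
      exact hj3

lemma good37 : GoodD [3, 7] := by
  intro v hv
  simp only [List.mem_cons, List.not_mem_nil, or_false] at hv
  rcases hv with rfl | rfl <;> exact ⟨by norm_num, by norm_num⟩

lemma inv37 : SimInv [3, 7] 0 1 :=
  ⟨good37, by norm_num, by norm_num, by norm_num, by norm_num, by norm_num⟩

-- ===== VERDICT (by name: the statement is the Claim_ definition above) =====
theorem part2_spec : Claim_equal_part2 := by
  unfold Claim_equal_part2
  intro n _ hpre
  unfold Spec_part2
  simp only [part2, part2_alt]
  obtain ⟨t, hGt, ht, htc, hround⟩ := target_spec n hpre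
  rw [hround, htc]
  have h37c : (#['3', '7'] : Array Char) = ((([3, 7] : List Int)).map dchr).toArray := by decide
  have h37i : (#[3, 7] : Array Int) = ([3, 7] : List Int).toArray := by decide
  rw [h37c, h37i]
  by_cases hno : NoOcc t [3, 7]
  · exact outer_eq t hGt ht 4294967297 4294967296 32 [3, 7] 0 1 inv37 hno
      (by norm_num) (by norm_num) (by norm_num)
  · -- the target already occurs in the initial "37"
    have hex : ∃ j, Occ t [3, 7] j := by
      unfold NoOcc at hno
      push_neg at hno
      exact hno
    obtain ⟨j, hj, hjmin⟩ := exists_min_occ hex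
    have hfit : j + t.length ≤ 2 := occ_len ht hj
    have hA : PySem.Chars.find
        (part2Loop (t.map dchr) 4294967296 ((([3, 7] : List Int).map dchr).toArray)
          [0, 1]).1.toList (t.map dchr) = (j : Int) :=
      a_exit t [3, 7] j 4294967296 [0, 1]
        ((occ_map_iff hGt good37 j).mp hj)
        (fun i hi hoc => hjmin i hi ((occ_map_iff hGt good37 i).mpr hoc))
        (by simp only [List.length_cons, List.length_nil]; omega)
    rw [hA]
    rw [show (4294967297 : Nat) = 4294967296 + 1 from rfl]
    obtain ⟨f', d', e1', e2', heq, hinv', ⟨u, hu⟩, _, _, _, _⟩ :=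
      gen_spec 4294967296 32 [3, 7] 0 1 inv37
    rw [altOuter_succ]
    simp only [heq]
    have hocc' : Occ t d' j := by rw [hu]; exact occ_ext u hj hfit
    have hmin' : ∀ i, i < j → ¬ Occ t d' i := by
      rw [hu]; exact occ_min_append u ht hj hjmin
    have hfind : altFind d'.toArray t = (j : Int) := find_occ_alt ht hocc' hmin'
    rw [hfind]
    rw [if_pos (by omega)]
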